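-- pv_equiv track=rewrite | github.com/xingyuli9961/CS262AProject-FlitReduce-NoC_Compression | compresor_lib.py | no_delta_compressor2
-- ===== SOURCE A (Python) =====
-- def no_delta_compressor2(data_flits):
--     base_flit = data_flits[0]
--     delta_flits = []
--
--     for flit in data_flits[1:]:
--         offset = flit - base_flit
--         if -32768 <= offset <= 32767:
--             delta_flits.append(offset)
--         else:
--             return False, None, None
--
--     return True, base_flit, delta_flits
-- ===== SOURCE B (Python) =====
-- def no_delta_compressor2(data_flits):
--     base_flit = data_flits[0]
--     rest = data_flits[1:]
--     # Validate on the RAW flits: all must lie in the window [base-32768, base+32767].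
--     if rest and not (base_flit - 32768 <= min(rest) and max(rest) <= base_flit + 32767):
--         return False, None, None
--     return True, base_flit, [f - base_flit for f in rest]
-- ===== Notes on version B (the rewrite author's own statement) =====
-- stated objective: alternative
-- what changed: B never computes a delta while validating: it checks that the raw flits' min/max lie in the absolute window [base-32768, base+32767], and only on success performs a single map pass that delta-encodes; A fuses per-element delta computation with the range check in one early-return loop.
import Mathlib
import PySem

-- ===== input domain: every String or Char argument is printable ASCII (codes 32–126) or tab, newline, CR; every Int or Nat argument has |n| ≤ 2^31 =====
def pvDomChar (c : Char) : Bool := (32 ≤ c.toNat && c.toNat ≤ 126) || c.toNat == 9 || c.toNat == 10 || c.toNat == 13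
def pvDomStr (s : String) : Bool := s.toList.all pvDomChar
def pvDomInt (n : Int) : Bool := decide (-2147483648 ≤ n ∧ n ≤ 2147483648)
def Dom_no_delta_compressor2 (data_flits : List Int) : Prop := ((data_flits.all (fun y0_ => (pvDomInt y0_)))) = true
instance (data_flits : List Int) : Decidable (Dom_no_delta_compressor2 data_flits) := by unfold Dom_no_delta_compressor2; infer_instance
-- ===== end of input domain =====

-- B validates the RAW flits (min/max inside the absolute window [base-32768, base+32767]) and only then delta-encodes in one map pass; A fuses per-element delta computation with the range check in one early-return loop. Objective: alternative decomposition, same cost.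

-- ===== PORT A =====
-- A's loop over data_flits[1:], appending offsets, early-returning on out-of-range.
def pvALoop (base : Int) (rest : List Int) (acc : List Int) : Bool × Option Int × Option (List Int) :=
  match rest with
  | [] => (true, some base, some acc)
  | f :: t =>
    let offset := f - base
    if -32768 ≤ offset ∧ offset ≤ 32767 then pvALoop base t (acc ++ [offset])
    else (false, none, none)

def no_delta_compressor2 (data_flits : List Int) : Bool × Option Int × Option (List Int) :=
  match data_flits with
  | [] => (false, none, none)   -- unreachable: Python raises IndexError on data_flits[0]; excluded by Pre_
  | base :: rest => pvALoop base rest []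

-- ===== PORT B =====
def no_delta_compressor2_alt (data_flits : List Int) : Bool × Option Int × Option (List Int) :=
  match data_flits with
  | [] => (false, none, none)   -- unreachable: Python raises IndexError on data_flits[0]; excluded by Pre_
  | base :: rest =>
    -- 'if rest and not (base-32768 <= min(rest) and max(rest) <= base+32767): return False,None,None'
    let inWindow : Bool :=
      match PySem.List.min? rest (fun x => x), PySem.List.max? rest (fun x => x) with
      | some m, some M => decide (base - 32768 ≤ m ∧ M ≤ base + 32767)
      | _, _ => true
    if rest ≠ [] ∧ inWindow = false
    then (false, none, none)
    else (true, some base, some (rest.map (fun f => f - base)))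

-- ===== PRECONDITION & SPEC =====
-- Pre_ excludes only the empty list, on which A raises IndexError (data_flits[0]).
def Pre_no_delta_compressor2 (data_flits : List Int) : Prop := data_flits ≠ []
instance (data_flits : List Int) : Decidable (Pre_no_delta_compressor2 data_flits) := by unfold Pre_no_delta_compressor2; infer_instance
def pvWitness_no_delta_compressor2 : List Int := [5, 6, 7]

def Spec_no_delta_compressor2 (data_flits : List Int) (out : Bool × Option Int × Option (List Int)) : Prop := out = no_delta_compressor2_alt data_flits
instance (data_flits : List Int) (out : Bool × Option Int × Option (List Int)) : Decidable (Spec_no_delta_compressor2 data_flits out) := by unfold Spec_no_delta_compressor2; infer_instance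

-- ===== CLAIM =====
def Claim_equal_no_delta_compressor2 : Prop := ∀ (data_flits : List Int), Dom_no_delta_compressor2 data_flits → Pre_no_delta_compressor2 data_flits → Spec_no_delta_compressor2 data_flits (no_delta_compressor2 data_flits)

-- ===== LEMMAS AND PROOFS =====

-- A's loop, characterised: all deltas in range → collect all deltas; otherwise (false, none, none).
theorem pvALoop_char (base : Int) (rest : List Int) (acc : List Int) :
    pvALoop base rest acc =
      if ∀ f ∈ rest, -32768 ≤ f - base ∧ f - base ≤ 32767
      then (true, some base, some (acc ++ rest.map (fun f => f - base)))
      else (false, none, none) := by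
  induction rest generalizing acc with
  | nil => simp [pvALoop]
  | cons f t ih =>
    simp only [pvALoop, List.mem_cons, forall_eq_or_imp, List.map_cons]
    by_cases hf : -32768 ≤ f - base ∧ f - base ≤ 32767
    · rw [if_pos hf, ih]
      by_cases ht : ∀ g ∈ t, -32768 ≤ g - base ∧ g - base ≤ 32767
      · rw [if_pos ht, if_pos ⟨hf, ht⟩]; simp
      · rw [if_neg ht, if_neg (fun h => ht h.2)]
    · rw [if_neg hf, if_neg (fun h => hf h.1)]

theorem no_delta_compressor2_spec : Claim_equal_no_delta_compressor2 := by
  intro data_flits _ hpre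
  unfold Spec_no_delta_compressor2
  match data_flits with
  | [] => exact absurd rfl hpre
  | base :: rest =>
    show pvALoop base rest [] = no_delta_compressor2_alt (base :: rest)
    rw [pvALoop_char]
    unfold no_delta_compressor2_alt
    by_cases hnil : rest = []
    · subst hnil; simp
    · have hM := PySem.List.max?_eq_none_iff (xs := rest) (key := fun x : Int => x)
      have hm := PySem.List.min?_eq_none_iff (xs := rest) (key := fun x : Int => x)
      match hmeq : PySem.List.min? rest (fun x => x), hMeq : PySem.List.max? rest (fun x => x) with
      | none, _ => exact absurd (hm.mp hmeq) hnil
      | some m, none => exact absurd (hM.mp hMeq) hnil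
      | some m, some M =>
        have hMmem := PySem.List.max?_mem hMeq
        have hmmem := PySem.List.min?_mem hmeq
        have hMmax := PySem.List.max?_isMax hMeq
        have hmmin := PySem.List.min?_isMin hmeq
        simp only [hmeq, hMeq]
        have key : (∀ f ∈ rest, -32768 ≤ f - base ∧ f - base ≤ 32767) ↔
            (base - 32768 ≤ m ∧ M ≤ base + 32767) := by
          constructor
          · intro hall
            have h1 := hall m hmmem
            have h2 := hall M hMmem
            omega
          · intro hmw f hf
            have h1 := hmmin f hf
            have h2 := hMmax f hf
            simp only at h1 h2
            omega
        by_cases hall : ∀ f ∈ rest, -32768 ≤ f - base ∧ f - base ≤ 32767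
        · rw [if_pos hall, if_neg]
          · rfl
          · simp [key.mp hall]
        · rw [if_neg hall, if_pos]
          refine ⟨hnil, ?_⟩
          simp only [decide_eq_false_iff_not]
          exact fun hc => hall (key.mpr hc)

-- ===== VERDICT =====
-- (no_delta_compressor2_spec above is the verdict theorem)
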